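-- pv_equiv track=rewrite | github.com/MobileInspirations/summit-customer-compass | backend/app/services/categorization_service.py | _get_highest_scoring_bucket
-- ===== SOURCE A (Python) =====
-- from typing import List, Dict, Tuple
--
-- def _get_highest_scoring_bucket(scores: Dict[str, int], bucket_mapping: Dict[str, str]) -> str:
--     """Get the highest scoring bucket, defaulting to DEFAULT if no clear winner"""
--     if not scores:
--         return bucket_mapping["DEFAULT"]
--
--     max_score = max(scores.values())
--     if max_score == 0:
--         return bucket_mapping["DEFAULT"]
--
--     # Get all buckets with the maximum score
--     max_buckets = [bucket for bucket, score in scores.items() if score == max_score]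
--
--     # If there's a tie, use the first one (could be enhanced with more sophisticated tie-breaking)
--     return bucket_mapping[max_buckets[0]]
-- ===== SOURCE B (Python) =====
-- def _get_highest_scoring_bucket(scores, bucket_mapping):
--     """Stable-sort the items by score descending and take the head."""
--     ranked = sorted(scores.items(), key=lambda kv: kv[1], reverse=True)
--     if not ranked or ranked[0][1] == 0:
--         return bucket_mapping["DEFAULT"]
--     return bucket_mapping[ranked[0][0]]
-- ===== Notes on version B (the rewrite author's own statement) =====
-- stated objective: alternative
-- what changed: Replaces the max-of-values pass plus tie-filter comprehension with a stable descending sort of the items, whose head is exactly the first maximal bucket.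
import Mathlib
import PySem

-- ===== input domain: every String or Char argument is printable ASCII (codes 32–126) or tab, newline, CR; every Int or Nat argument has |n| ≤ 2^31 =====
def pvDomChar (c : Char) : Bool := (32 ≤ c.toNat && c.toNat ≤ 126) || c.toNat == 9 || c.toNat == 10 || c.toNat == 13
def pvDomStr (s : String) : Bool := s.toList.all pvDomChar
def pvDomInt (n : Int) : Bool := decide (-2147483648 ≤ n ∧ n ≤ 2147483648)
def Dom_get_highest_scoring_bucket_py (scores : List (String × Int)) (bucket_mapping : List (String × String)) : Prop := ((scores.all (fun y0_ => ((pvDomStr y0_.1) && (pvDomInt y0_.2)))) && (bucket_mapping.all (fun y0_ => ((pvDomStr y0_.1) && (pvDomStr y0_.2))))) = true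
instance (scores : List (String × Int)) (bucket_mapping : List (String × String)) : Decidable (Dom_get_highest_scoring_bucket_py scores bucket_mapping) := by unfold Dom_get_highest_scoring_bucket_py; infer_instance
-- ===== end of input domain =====

-- B replaces A's max-of-values + tie-filter with a stable descending sort whose head is the first maximal bucket; proved equal on Pre_ (no claim about speed).


-- ===== PORT A =====
-- dict indexing bucket_mapping[k]; Pre_ guarantees the key is present, so the none branch ("" default) is unreachable
def pvLookup (m : List (String × String)) (k : String) : String :=
  ((m.find? (fun p => p.1 == k)).map Prod.snd).getD ""

def get_highest_scoring_bucket_py (scores : List (String × Int)) (bucket_mapping : List (String × String)) : String :=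
  if scores.isEmpty then pvLookup bucket_mapping "DEFAULT"
  else
    let max_score := (PySem.List.max? (scores.map Prod.snd) (fun x => x)).getD 0
    if max_score = 0 then pvLookup bucket_mapping "DEFAULT"
    else
      let max_buckets := (scores.filter (fun p => p.2 == max_score)).map Prod.fst
      pvLookup bucket_mapping (max_buckets.headD "")

-- ===== PORT B =====
def get_highest_scoring_bucket_py_alt (scores : List (String × Int)) (bucket_mapping : List (String × String)) : String :=
  let ranked := PySem.List.sorted scores (fun kv => kv.2) true
  match ranked with
  | [] => pvLookup bucket_mapping "DEFAULT"
  | r :: _ => if r.2 = 0 then pvLookup bucket_mapping "DEFAULT" else pvLookup bucket_mapping r.1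

-- ===== PRECONDITION & SPEC =====
-- the key A (and B) index bucket_mapping with when the maximum score is nonzero: the first bucket attaining it
def pvFirstArgmax (scores : List (String × Int)) : String :=
  ((scores.filter (fun p => p.2 == ((scores.map Prod.snd).max?.getD 0))).map Prod.fst).headD ""

-- Pre_ excludes association lists with duplicate keys (they do not represent any Python dict input) and exactly the
-- inputs on which A raises KeyError: "DEFAULT" must be mapped when scores is empty or its maximum score is 0, and
-- otherwise the first bucket attaining the maximum score must be mapped.
def Pre_get_highest_scoring_bucket_py (scores : List (String × Int)) (bucket_mapping : List (String × String)) : Prop :=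
  (scores.map Prod.fst).Nodup ∧ (bucket_mapping.map Prod.fst).Nodup ∧
  ((scores.map Prod.snd).max?.getD 0 = 0 → "DEFAULT" ∈ bucket_mapping.map Prod.fst) ∧
  ((scores.map Prod.snd).max?.getD 0 ≠ 0 → pvFirstArgmax scores ∈ bucket_mapping.map Prod.fst)
instance (scores : List (String × Int)) (bucket_mapping : List (String × String)) : Decidable (Pre_get_highest_scoring_bucket_py scores bucket_mapping) := by unfold Pre_get_highest_scoring_bucket_py; infer_instance

def pvWitness_get_highest_scoring_bucket_py : (List (String × Int)) × (List (String × String)) :=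
  ([("a", 2), ("b", 2)], [("a", "Alpha"), ("b", "Beta"), ("DEFAULT", "Dflt")])

def Spec_get_highest_scoring_bucket_py (scores : List (String × Int)) (bucket_mapping : List (String × String)) (out : String) : Prop := out = get_highest_scoring_bucket_py_alt scores bucket_mapping
instance (scores : List (String × Int)) (bucket_mapping : List (String × String)) (out : String) : Decidable (Spec_get_highest_scoring_bucket_py scores bucket_mapping out) := by unfold Spec_get_highest_scoring_bucket_py; infer_instance

-- ===== CLAIM (what is proved, stated in full; the proofs are below) =====
def Claim_equal_get_highest_scoring_bucket_py : Prop := ∀ (scores : List (String × Int)) (bucket_mapping : List (String × String)), Dom_get_highest_scoring_bucket_py scores bucket_mapping → Pre_get_highest_scoring_bucket_py scores bucket_mapping → Spec_get_highest_scoring_bucket_py scores bucket_mapping (get_highest_scoring_bucket_py scores bucket_mapping)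

-- ===== LEMMAS AND PROOFS =====

-- proof-side abstraction of the evolving HEAD of B's insertion sort: keep the first maximal pair
def pvBestStep (acc : Option (String × Int)) (p : String × Int) : Option (String × Int) :=
  match acc with
  | none => some p
  | some q => if p.2 > q.2 then some p else some q

-- the running max is an upper bound of its seed
lemma seed_le_foldl_max (l : List (String × Int)) (a : Int) :
    a ≤ l.foldl (fun b x => max b x.2) a := by
  induction l generalizing a with
  | nil => simp
  | cons q t ih => exact le_trans (le_max_left _ _) (ih (max a q.2))

-- the fold keeps exactly (first bucket attaining the max, the max of all scores seen)
lemma best_fold (l : List (String × Int)) (p : String × Int) :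
    ∃ r, List.foldl pvBestStep (some p) l = some r ∧
      r.2 = l.foldl (fun a x => max a x.2) p.2 ∧
      (((p :: l).filter (fun x => x.2 == r.2)).map Prod.fst).headD "" = r.1 := by
  induction l generalizing p with
  | nil =>
    refine ⟨p, rfl, by simp, ?_⟩
    simp [List.filter]
  | cons q t ih =>
    obtain ⟨r, hfold, hmax, hhead⟩ := ih (if q.2 > p.2 then q else p)
    refine ⟨r, ?_, ?_, ?_⟩
    · simpa [pvBestStep, apply_ite] using hfold
    · simp only [List.foldl]
      rw [hmax]
      by_cases h : q.2 > p.2 <;> simp [h] <;> congr 1 <;> omega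
    · have hub : (if q.2 > p.2 then q else p).2 ≤ r.2 := hmax ▸ seed_le_foldl_max _ _
      by_cases h : q.2 > p.2
      · have hp : ¬ (p.2 == r.2) := by
          simp only [if_pos h] at hub
          simp only [beq_iff_eq]; omega
        rw [List.filter_cons_of_neg (by simpa using hp)]
        simpa [h] using hhead
      · simp only [if_neg h] at hub hhead
        by_cases hpm : p.2 = r.2
        · rw [List.filter_cons_of_pos (by simpa using hpm)]
          rw [List.filter_cons_of_pos (by simpa using hpm)] at hhead
          simpa using hhead
        · have hq : ¬ (q.2 = r.2) := by omega
          rw [List.filter_cons_of_neg (by simpa using hpm),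
              List.filter_cons_of_neg (by simpa using hq)]
          rw [List.filter_cons_of_neg (by simpa using hpm)] at hhead
          exact hhead

-- inserting into a nonempty accumulator: the head is the better of x and the old head (old head wins ties)
lemma head_insertBy (x : String × Int) (acc : List (String × Int)) (y : String × Int)
    (h : acc.head? = some y) :
    (PySem.List.insertBy (fun a b => decide (b.2 < a.2)) x acc).head? =
      some (if x.2 > y.2 then x else y) := by
  cases acc with
  | nil => simp at h
  | cons z zs =>
    have hz : z = y := by simpa using h
    subst hz
    by_cases hlt : z.2 < x.2
    · simp [PySem.List.insertBy, hlt]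
    · simp [PySem.List.insertBy, hlt]

-- the head of B's insertion-sort fold evolves exactly as the first-maximal fold pvBestStep
lemma head_foldl_insertBy (l : List (String × Int)) :
    ∀ (acc : List (String × Int)) (y : String × Int), acc.head? = some y →
    (List.foldl (fun acc x => PySem.List.insertBy (fun a b => decide (b.2 < a.2)) x acc) acc l).head? =
      List.foldl pvBestStep (some y) l := by
  induction l with
  | nil => intro acc y h; simpa using h
  | cons q t ih =>
    intro acc y h
    have hstep := head_insertBy q acc y h
    simp only [List.foldl]
    rw [ih _ _ hstep]
    simp [pvBestStep, apply_ite]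

-- the head of B's descending stable sort is the first maximal pair
lemma head_sorted_rev (p : (String × Int)) (l : List (String × Int)) :
    (PySem.List.sorted (p :: l) (fun kv => kv.2) true).head? = List.foldl pvBestStep (some p) l := by
  rw [PySem.List.sorted_rev_eq_foldl_insertBy]
  simp only [List.foldl]
  exact head_foldl_insertBy l [p] p rfl

-- ===== VERDICT (by name: the statement is the Claim_ definition above) =====
theorem get_highest_scoring_bucket_py_spec : Claim_equal_get_highest_scoring_bucket_py := by
  intro scores bucket_mapping _ _
  unfold Spec_get_highest_scoring_bucket_py
  cases scores with
  | nil => rfl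
  | cons p l =>
    obtain ⟨r, hfold, hmax, hhead⟩ := best_fold l p
    have hms : (PySem.List.max? ((p :: l).map Prod.snd) (fun x => x)).getD 0 = r.2 := by
      rw [List.map_cons, PySem.List.max?_id_cons, Option.getD_some, List.foldl_map, hmax]
    have hsorted : (PySem.List.sorted (p :: l) (fun kv => kv.2) true).head? = some r := by
      rw [head_sorted_rev, hfold]
    unfold get_highest_scoring_bucket_py get_highest_scoring_bucket_py_alt
    cases hS : PySem.List.sorted (p :: l) (fun kv => kv.2) true with
    | nil => rw [hS] at hsorted; simp at hsorted
    | cons r' t =>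
      rw [hS] at hsorted
      simp only [List.head?_cons, Option.some.injEq] at hsorted
      subst hsorted
      simp only [List.isEmpty_cons, Bool.false_eq_true, if_false, hms]
      by_cases h0 : r'.2 = 0
      · simp [h0]
      · simp only [if_neg h0, hhead]
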